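-- pv_equiv track=rewrite | github.com/Quyet160903/Tech_Test | A05_task/knowledge_base/processors/text_processor.py | _find_break_point
-- ===== SOURCE A (Python) =====
-- def _find_break_point(text: str, position: int) -> int:
--     """Find a good breaking point near the position"""
--     # Look for paragraph breaks first
--     for i in range(position, max(0, position - 100), -1):
--         if i < len(text) and text[i] == "\n" and i > 0 and text[i-1] == "\n":
--             return i + 1
--
--     # Look for sentence breaks
--     for i in range(position, max(0, position - 100), -1):
--         if i < len(text) and text[i] in ".!?" and (i + 1 >= len(text) or text[i+1].isspace()):
--             return i + 1
--
--     # Look for any whitespace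
--     for i in range(position, max(0, position - 50), -1):
--         if i < len(text) and text[i].isspace():
--             return i + 1
--
--     # If no good breaking point found, just break at the position
--     return position
-- ===== SOURCE B (Python) =====
-- def _find_break_point(text: str, position: int) -> int:
--     """Find a good breaking point near the position (single backward scan)."""
--     stop100 = max(0, position - 100)
--     stop50 = max(0, position - 50)
--     para = sent = ws = None
--     for i in range(position, stop100, -1):
--         if para is None and i < len(text) and text[i] == "\n" and i > 0 and text[i-1] == "\n":
--             para = i
--         if sent is None and i < len(text) and text[i] in ".!?" and (i + 1 >= len(text) or text[i+1].isspace()):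
--             sent = i
--         if ws is None and i > stop50 and i < len(text) and text[i].isspace():
--             ws = i
--     if para is not None:
--         return para + 1
--     if sent is not None:
--         return sent + 1
--     if ws is not None:
--         return ws + 1
--     return position
-- ===== Notes on version B (the rewrite author's own statement) =====
-- stated objective: alternative
-- what changed: A makes three separate backward passes over the window (paragraph, then sentence, then whitespace); B makes a single backward pass that records the first paragraph, sentence and whitespace candidates (whitespace only inside the narrower 50-window) and picks them in priority order afterwards.
import Mathlib
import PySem

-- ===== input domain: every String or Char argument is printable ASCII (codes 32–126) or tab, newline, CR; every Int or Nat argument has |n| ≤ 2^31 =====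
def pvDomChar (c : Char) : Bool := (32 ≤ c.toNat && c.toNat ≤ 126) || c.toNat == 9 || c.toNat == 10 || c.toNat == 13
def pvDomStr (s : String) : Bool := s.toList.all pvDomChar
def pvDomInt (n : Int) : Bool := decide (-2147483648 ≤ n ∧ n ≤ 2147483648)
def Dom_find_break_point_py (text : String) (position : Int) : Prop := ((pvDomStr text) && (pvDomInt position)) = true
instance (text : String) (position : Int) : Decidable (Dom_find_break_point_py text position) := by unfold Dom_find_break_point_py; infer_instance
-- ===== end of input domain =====

-- B replaces A's three backward scans by ONE backward scan recording the first paragraph/sentence/whitespace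
-- candidate (objective: alternative decomposition, same cost); equivalence of the two is proved for all inputs.

-- ===== PORT A =====
-- The three per-index tests appear verbatim in BOTH Python sources (A's loop bodies and B's loop body),
-- so they are shared helpers; branch order and guards follow the Python exactly.
-- 'text[i] == "\n" …' guarded by 'i < len(text)' / 'i > 0': PySem.Str.pyGet? is exact (it is `some` under those guards).
def bpPara (text : String) (i : Int) : Bool :=
  decide (i < PySem.Str.len text) && (PySem.Str.pyGet? text i == some '\n') &&
  decide (0 < i) && (PySem.Str.pyGet? text (i - 1) == some '\n')

def bpSent (text : String) (i : Int) : Bool :=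
  decide (i < PySem.Str.len text) &&
  (match PySem.Str.pyGet? text i with
   | some c => c == '.' || c == '!' || c == '?'
   | none => false) &&
  (decide (PySem.Str.len text ≤ i + 1) ||
   (match PySem.Str.pyGet? text (i + 1) with
    | some c => PySem.Chars.isspace c
    | none => false))

def bpWs (text : String) (i : Int) : Bool :=
  decide (i < PySem.Str.len text) &&
  (match PySem.Str.pyGet? text i with
   | some c => PySem.Chars.isspace c
   | none => false)

-- 'for i in range(…): if cond(i): return i + 1' (falls through to the next statement when no hit)
def aScan (cond : Int → Bool) : List Int → Option Int
  | [] => none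
  | i :: rest => if cond i then some (i + 1) else aScan cond rest

def find_break_point_py (text : String) (position : Int) : Int :=
  match aScan (bpPara text) (PySem.List.pyRange position (max 0 (position - 100)) (-1)) with
  | some r => r
  | none =>
    match aScan (bpSent text) (PySem.List.pyRange position (max 0 (position - 100)) (-1)) with
    | some r => r
    | none =>
      match aScan (bpWs text) (PySem.List.pyRange position (max 0 (position - 50)) (-1)) with
      | some r => r
      | none => position

-- ===== PORT B =====
-- Source B's single loop: three Option accumulators, each set at most once (first hit), whitespace
-- only while i > stop50.
def bLoop (text : String) (stop50 : Int) :
    List Int → Option Int → Option Int → Option Int → Option Int × Option Int × Option Int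
  | [], p, s, w => (p, s, w)
  | i :: rest, p, s, w =>
      bLoop text stop50 rest
        (if p.isNone && bpPara text i then some i else p)
        (if s.isNone && bpSent text i then some i else s)
        (if w.isNone && (decide (stop50 < i) && bpWs text i) then some i else w)

def find_break_point_py_alt (text : String) (position : Int) : Int :=
  match bLoop text (max 0 (position - 50))
      (PySem.List.pyRange position (max 0 (position - 100)) (-1)) none none none with
  | (some v, _, _) => v + 1
  | (none, some v, _) => v + 1
  | (none, none, some v) => v + 1
  | (none, none, none) => position

-- ===== PRECONDITION & SPEC =====
def Spec_find_break_point_py (text : String) (position : Int) (out : Int) : Prop := out = find_break_point_py_alt text position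
instance (text : String) (position : Int) (out : Int) : Decidable (Spec_find_break_point_py text position out) := by unfold Spec_find_break_point_py; infer_instance

-- ===== CLAIM (what is proved, stated in full; the proofs are below) =====
def Claim_equal_find_break_point_py : Prop := ∀ (text : String) (position : Int), Dom_find_break_point_py text position → Spec_find_break_point_py text position (find_break_point_py text position)

-- ===== LEMMAS AND PROOFS =====

-- A's early-return loop is the first hit of the range, shifted by one.
theorem aScan_eq_find (cond : Int → Bool) (l : List Int) :
    aScan cond l = (l.find? cond).map (· + 1) := by
  induction l with
  | nil => rfl
  | cons i rest ih =>
    by_cases h : cond i = true <;> simp [aScan, h, ih]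

-- one accumulator step = first-match semantics
theorem acc_step (c : Int → Bool) (i : Int) (rest : List Int) (p : Option Int) :
    (if p.isNone && c i then some i else p).or (rest.find? c) = p.or ((i :: rest).find? c) := by
  cases p <;> by_cases h : c i = true <;> simp [h]

-- B's single loop computes the three first hits independently.
theorem bLoop_eq (text : String) (stop50 : Int) (l : List Int) (p s w : Option Int) :
    bLoop text stop50 l p s w =
      (p.or (l.find? (bpPara text)), s.or (l.find? (bpSent text)),
       w.or (l.find? (fun i => decide (stop50 < i) && bpWs text i))) := by
  induction l generalizing p s w with
  | nil => simp [bLoop]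
  | cons i rest ih =>
    rw [bLoop, ih, acc_step (bpPara text), acc_step (bpSent text),
        acc_step (fun i => decide (stop50 < i) && bpWs text i)]

-- Guarded whitespace search over the 100-window = plain whitespace search over the 50-window.
theorem ws_range (text : String) (s100 s50 : Int) (h : s100 ≤ s50) :
    ∀ (n : Nat) (a : Int), (a - s100).toNat ≤ n →
      (PySem.List.pyRange a s100 (-1)).find? (fun i => decide (s50 < i) && bpWs text i)
        = (PySem.List.pyRange a s50 (-1)).find? (bpWs text) := by
  intro n
  induction n with
  | zero =>
    intro a ha
    have ha' : a ≤ s100 := by omega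
    rw [PySem.List.pyRange_neg_one_eq_nil ha', PySem.List.pyRange_neg_one_eq_nil (by omega)]
    rfl
  | succ n ih =>
    intro a ha
    by_cases h1 : a ≤ s100
    · rw [PySem.List.pyRange_neg_one_eq_nil h1, PySem.List.pyRange_neg_one_eq_nil (by omega)]
      rfl
    · rw [PySem.List.pyRange_neg_one_cons (by omega : s100 < a)]
      by_cases h2 : s50 < a
      · rw [PySem.List.pyRange_neg_one_cons h2]
        by_cases hc : bpWs text a = true
        · simp [hc, h2]
        · simp [hc, h2, ih (a - 1) (by omega)]
      · have hnil : PySem.List.pyRange a s50 (-1) = [] :=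
          PySem.List.pyRange_neg_one_eq_nil (by omega)
        have hnil' : PySem.List.pyRange (a - 1) s50 (-1) = [] :=
          PySem.List.pyRange_neg_one_eq_nil (by omega)
        rw [hnil]
        have := ih (a - 1) (by omega)
        rw [hnil'] at this
        simp [h2, this]

-- ===== VERDICT (by name: the statement is the Claim_ definition above) =====
theorem find_break_point_py_spec : Claim_equal_find_break_point_py := by
  intro text position _
  unfold Spec_find_break_point_py find_break_point_py find_break_point_py_alt
  rw [bLoop_eq, aScan_eq_find, aScan_eq_find, aScan_eq_find,
      ws_range text (max 0 (position - 100)) (max 0 (position - 50)) (by omega)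
        (position - max 0 (position - 100)).toNat position (le_refl _)]
  simp only [Option.none_or]
  cases (PySem.List.pyRange position (max 0 (position - 100)) (-1)).find? (bpPara text) <;>
    cases (PySem.List.pyRange position (max 0 (position - 100)) (-1)).find? (bpSent text) <;>
      cases (PySem.List.pyRange position (max 0 (position - 50)) (-1)).find? (bpWs text) <;>
        simp
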